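-- pv_equiv track=rewrite | github.com/Yong-Zhuang/Tutoring | Coding/Array/degree-of-freedom.py | sumOfDofs
-- ===== SOURCE A (Python) =====
-- from typing import List
--
-- def sumOfDofs(nums: List[int]) -> int:
--     dof = [0 for _ in nums]
--     for i in range(len(nums)):
--         dof[i] = max(dof[i-1], dof[i])
--         maxn, minn = nums[i], nums[i]
--         for j in range(i+1, len(nums)):
--             minn = min(minn, nums[j])
--             maxn = max(maxn, nums[j])
--             dof[j] = max(dof[j], dof[i-1]+maxn-minn)
--     return dof[-1]
-- ===== SOURCE B (Python) =====
-- from typing import List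
--
-- def sumOfDofs(nums: List[int]) -> int:
--     # O(n) single pass.  Since range(j..i) = max_{a,b in [j..i]} (nums[a]-nums[b])
--     # and the partition DP is nondecreasing, dp[i] separates into
--     #   dp[i] = max_b ( max_{a<=b} (dp[a-1]+nums[a]) - nums[b] ,
--     #                   max_{a<=b} (dp[a-1]-nums[a]) + nums[b] )
--     # so four running maxima replace the inner scan entirely.
--     mP = nums[0]          # max over a<=j of dp[a-1] + nums[a]   (dp[-1] = 0)
--     mQ = -nums[0]         # max over a<=j of dp[a-1] - nums[a]
--     best1 = best2 = dp = 0
--     for j in range(1, len(nums)):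
--         x = nums[j]
--         mP = max(mP, dp + x)
--         mQ = max(mQ, dp - x)
--         best1 = max(best1, mP - x)
--         best2 = max(best2, mQ + x)
--         dp = max(best1, best2)
--     return dp
-- ===== Notes on version B (the rewrite author's own statement) =====
-- stated objective: faster
-- what changed: A is the quadratic partition DP pushing dp[i-1]+running-range forward into a mutable array; B uses the identity range(j..i)=max_{a,b}(nums[a]-nums[b]) together with monotonicity of the DP to separate the recurrence into four running maxima, giving a single O(n) pass with no inner loop.
import Mathlib
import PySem

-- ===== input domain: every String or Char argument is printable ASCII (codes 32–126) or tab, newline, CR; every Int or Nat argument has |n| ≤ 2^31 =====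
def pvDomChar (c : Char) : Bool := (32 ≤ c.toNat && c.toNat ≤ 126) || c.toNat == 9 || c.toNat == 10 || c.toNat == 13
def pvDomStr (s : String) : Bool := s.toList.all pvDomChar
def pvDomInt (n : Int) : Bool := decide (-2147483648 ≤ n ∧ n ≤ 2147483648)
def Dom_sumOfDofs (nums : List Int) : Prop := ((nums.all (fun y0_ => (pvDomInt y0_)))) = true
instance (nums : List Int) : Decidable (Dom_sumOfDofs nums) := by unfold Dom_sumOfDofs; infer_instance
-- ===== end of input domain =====

-- B replaces A's quadratic partition DP by a single linear pass: using
-- range(j..i) = max_{a,b}(nums[a]-nums[b]) and monotonicity of the DP, the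
-- recurrence separates into four running maxima; equivalence of the RETURN
-- value is proved on all non-empty lists (A raises IndexError on []).


-- ===== PORT A =====
-- Literal transliteration of A: dof = [0]*n; outer i forward, inner j forward
-- updating dof[j]; dof[i-1] re-read each step (negative index at i = 0 handled
-- exactly by pyGetD); loop indices come from range(len(nums)), so plain getD is
-- exact for the always-in-range reads nums[i], nums[j], dof[i], dof[j].
def sumOfDofs (nums : List Int) : Int :=
  let n := nums.length
  let dof0 : List Int := List.replicate n 0
  let dof := (List.range n).foldl (fun dof i =>
    -- dof[i] = max(dof[i-1], dof[i])
    let dof := dof.set i (max (PySem.List.pyGetD dof ((i : Int) - 1) 0) (dof.getD i 0))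
    -- maxn, minn = nums[i], nums[i]; for j in range(i+1, n): …
    let st := (List.range' (i + 1) (n - (i + 1))).foldl
      (fun (st : List Int × Int × Int) j =>
        let minn := min st.2.2 (nums.getD j 0)
        let maxn := max st.2.1 (nums.getD j 0)
        let dof := st.1.set j (max (st.1.getD j 0)
          (PySem.List.pyGetD st.1 ((i : Int) - 1) 0 + maxn - minn))
        (dof, maxn, minn))
      (dof, nums.getD i 0, nums.getD i 0)
    st.1) dof0
  PySem.List.pyGetD dof (-1) 0   -- return dof[-1] (IndexError on [] is outside Pre_)

-- ===== PORT B =====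
-- Literal transliteration of Source B: state (mP, mQ, best1, best2, dp), one fold
-- over j = 1 … n-1 (range(1, len(nums))); nums[0] read once for the initial
-- state (Source B raises IndexError on [] there, outside Pre_, so getD is exact on
-- the admitted inputs).
def sumOfDofs_alt (nums : List Int) : Int :=
  let st := (List.range' 1 (nums.length - 1)).foldl
    (fun (st : Int × Int × Int × Int × Int) j =>
      let x := nums.getD j 0
      let mP := max st.1 (st.2.2.2.2 + x)
      let mQ := max st.2.1 (st.2.2.2.2 - x)
      let b1 := max st.2.2.1 (mP - x)
      let b2 := max st.2.2.2.1 (mQ + x)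
      (mP, mQ, b1, b2, max b1 b2))
    (nums.getD 0 0, -(nums.getD 0 0), 0, 0, 0)
  st.2.2.2.2

-- ===== PRECONDITION & SPEC =====
-- A evaluates dof[-1] of an empty list on nums = [] (IndexError), so Pre_
-- excludes exactly the empty list.
def Pre_sumOfDofs (nums : List Int) : Prop := nums ≠ []
instance (nums : List Int) : Decidable (Pre_sumOfDofs nums) := by unfold Pre_sumOfDofs; infer_instance
def pvWitness_sumOfDofs : List Int := [3, 1, 2]

def Spec_sumOfDofs (nums : List Int) (out : Int) : Prop := out = sumOfDofs_alt nums
instance (nums : List Int) (out : Int) : Decidable (Spec_sumOfDofs nums out) := by unfold Spec_sumOfDofs; infer_instance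

-- ===== CLAIM (what is proved, stated in full; the proofs are below) =====
def Claim_equal_sumOfDofs : Prop := ∀ (nums : List Int), Dom_sumOfDofs nums → Pre_sumOfDofs nums → Spec_sumOfDofs nums (sumOfDofs nums)

-- ===== LEMMAS AND PROOFS =====

-- max / min of g over the index interval [lo, lo+c], folded forwards.
def fMax (g : Nat → Int) (lo : Nat) : Nat → Int
  | 0 => g lo
  | c + 1 => max (fMax g lo c) (g (lo + (c + 1)))

def fMin (g : Nat → Int) (lo : Nat) : Nat → Int
  | 0 => g lo
  | c + 1 => min (fMin g lo c) (g (lo + (c + 1)))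

theorem fMax_congr (g g' : Nat → Int) (lo c : Nat)
    (h : ∀ k, lo ≤ k → k ≤ lo + c → g k = g' k) :
    fMax g lo c = fMax g' lo c := by
  induction c with
  | zero => exact h lo le_rfl (by omega)
  | succ c ih =>
      simp only [fMax]
      rw [ih (fun k h1 h2 => h k h1 (by omega)), h (lo + (c + 1)) (by omega) (by omega)]

theorem fMin_le_fMax (g : Nat → Int) (lo c : Nat) : fMin g lo c ≤ fMax g lo c := by
  induction c with
  | zero => simp [fMin, fMax]
  | succ c ih =>
      simp only [fMin, fMax]
      exact le_trans (le_trans (min_le_left _ _) ih) (le_max_left _ _)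

theorem le_fMax (g : Nat → Int) (lo c k : Nat) (h : k ≤ c) : g (lo + k) ≤ fMax g lo c := by
  induction c with
  | zero =>
      have hk : k = 0 := by omega
      subst hk; simp [fMax]
  | succ c ih =>
      by_cases hk : k ≤ c
      · exact le_trans (ih hk) (le_max_left _ _)
      · have hk' : k = c + 1 := by omega
        subst hk'
        exact le_max_right _ _

theorem fMax_le (g : Nat → Int) (lo c : Nat) (M : Int)
    (h : ∀ k, k ≤ c → g (lo + k) ≤ M) : fMax g lo c ≤ M := by
  induction c with
  | zero => simpa using h 0 le_rfl
  | succ c ih =>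
      exact max_le (ih (fun k hk => h k (by omega))) (h (c + 1) le_rfl)

theorem fMax_exists (g : Nat → Int) (lo c : Nat) :
    ∃ k, k ≤ c ∧ fMax g lo c = g (lo + k) := by
  induction c with
  | zero => exact ⟨0, le_rfl, by simp [fMax]⟩
  | succ c ih =>
      obtain ⟨k, hk, he⟩ := ih
      rcases le_total (g (lo + (c + 1))) (fMax g lo c) with h | h
      · exact ⟨k, by omega, by rw [show fMax g lo (c + 1) = max (fMax g lo c) (g (lo + (c + 1))) from rfl, max_eq_left h, he]⟩
      · exact ⟨c + 1, le_rfl, by rw [show fMax g lo (c + 1) = max (fMax g lo c) (g (lo + (c + 1))) from rfl, max_eq_right h]⟩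

theorem fMin_le_elem (g : Nat → Int) (lo c k : Nat) (h : k ≤ c) : fMin g lo c ≤ g (lo + k) := by
  induction c with
  | zero =>
      have hk : k = 0 := by omega
      subst hk; simp [fMin]
  | succ c ih =>
      by_cases hk : k ≤ c
      · exact le_trans (min_le_left _ _) (ih hk)
      · have hk' : k = c + 1 := by omega
        subst hk'
        exact min_le_right _ _

theorem fMin_exists (g : Nat → Int) (lo c : Nat) :
    ∃ k, k ≤ c ∧ fMin g lo c = g (lo + k) := by
  induction c with
  | zero => exact ⟨0, le_rfl, by simp [fMin]⟩
  | succ c ih =>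
      obtain ⟨k, hk, he⟩ := ih
      rcases le_total (fMin g lo c) (g (lo + (c + 1))) with h | h
      · exact ⟨k, by omega, by rw [show fMin g lo (c + 1) = min (fMin g lo c) (g (lo + (c + 1))) from rfl, min_eq_left h, he]⟩
      · exact ⟨c + 1, le_rfl, by rw [show fMin g lo (c + 1) = min (fMin g lo c) (g (lo + (c + 1))) from rfl, min_eq_right h]⟩

def aG (nums : List Int) (k : Nat) : Int := nums.getD k 0
def mxS (nums : List Int) (i j : Nat) : Int := fMax (aG nums) i (j - i)
def mnS (nums : List Int) (i j : Nat) : Int := fMin (aG nums) i (j - i)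

theorem fMax_succ_top (g : Nat → Int) (lo c : Nat) (h : 0 < c) :
    fMax g lo c = max (fMax g lo (c - 1)) (g (lo + c)) := by
  obtain ⟨c', rfl⟩ : ∃ c', c = c' + 1 := ⟨c - 1, by omega⟩
  rfl

theorem mnS_extend (nums : List Int) {t s : Nat} (_h : t ≤ s) :
    min (mnS nums t s) (nums.getD (s + 1) 0) = mnS nums t (s + 1) := by
  have h1 : s + 1 - t = (s - t) + 1 := by omega
  have h2 : t + (s - t + 1) = s + 1 := by omega
  have e1 : mnS nums t (s + 1)
      = min (fMin (aG nums) t (s - t)) (aG nums (t + (s - t + 1))) := by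
    rw [mnS, h1]
    rfl
  rw [e1, h2]
  rfl

theorem mxS_extend (nums : List Int) {t s : Nat} (_h : t ≤ s) :
    max (mxS nums t s) (nums.getD (s + 1) 0) = mxS nums t (s + 1) := by
  have h1 : s + 1 - t = (s - t) + 1 := by omega
  have h2 : t + (s - t + 1) = s + 1 := by omega
  have e1 : mxS nums t (s + 1)
      = max (fMax (aG nums) t (s - t)) (aG nums (t + (s - t + 1))) := by
    rw [mxS, h1]
    rfl
  rw [e1, h2]
  rfl

-- the specification dp list, built left to right
def dpL (nums : List Int) : Nat → List Int
  | 0 => []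
  | m + 1 =>
      dpL nums m ++
        [fMax (fun i => (if i = 0 then 0 else (dpL nums m).getD (i - 1) 0)
            + mxS nums i m - mnS nums i m) 0 m]

def dps (nums : List Int) (j : Nat) : Int := (dpL nums (j + 1)).getD j 0
def preF (nums : List Int) (i : Nat) : Int := if i = 0 then 0 else dps nums (i - 1)
def fAx (nums : List Int) (j i : Nat) : Int := preF nums i + mxS nums i j - mnS nums i j

theorem length_dpL (nums : List Int) (m : Nat) : (dpL nums m).length = m := by
  induction m with
  | zero => rfl
  | succ m ih => simp [dpL, ih]

theorem dpL_getD (nums : List Int) {k m : Nat} (h : k < m) :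
    (dpL nums m).getD k 0 = dps nums k := by
  induction m with
  | zero => omega
  | succ m ih =>
      by_cases hk : k < m
      · rw [← ih hk]
        simp only [dpL]
        rw [List.getD_append _ _ _ _ (by rw [length_dpL]; omega)]
      · have hk' : k = m := by omega
        subst hk'
        rfl

theorem mxS_self (nums : List Int) (m : Nat) : mxS nums m m = nums.getD m 0 := by
  rw [mxS, Nat.sub_self]; rfl

theorem mnS_self (nums : List Int) (m : Nat) : mnS nums m m = nums.getD m 0 := by
  rw [mnS, Nat.sub_self]; rfl

theorem dps_eq (nums : List Int) (m : Nat) :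
    dps nums m = fMax (fAx nums m) 0 m := by
  have h1 : dps nums m
      = fMax (fun i => (if i = 0 then 0 else (dpL nums m).getD (i - 1) 0)
          + mxS nums i m - mnS nums i m) 0 m := by
    show (dpL nums (m + 1)).getD m 0 = _
    simp only [dpL]
    rw [List.getD_append_right _ _ _ _ (by rw [length_dpL])]
    simp [length_dpL]
  rw [h1]
  exact fMax_congr _ _ 0 m (fun k hk1 hk2 => by
    by_cases hk : k = 0
    · simp [hk, fAx, preF]
    · have hlt : k - 1 < m := by omega
      simp only [fAx, preF, if_neg hk, dpL_getD nums hlt])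

theorem dps_zero (nums : List Int) : dps nums 0 = 0 := by
  rw [dps_eq]
  show fAx nums 0 0 = 0
  rw [fAx, preF, mxS_self, mnS_self]
  simp

theorem getD_map_range {f : Nat → Int} {n k : Nat} (h : k < n) (d : Int) :
    (((List.range n).map f).getD k d) = f k := by
  rw [List.getD_eq_getElem _ _ (by simpa using h)]
  simp

theorem set_map_range {f : Nat → Int} {n k : Nat} (_h : k < n) (v : Int) :
    ((List.range n).map f).set k v
      = (List.range n).map (fun j => if j = k then v else f j) := by
  apply List.ext_getElem
  · simp
  · intro i h1 h2
    simp only [List.getElem_set, List.getElem_map, List.getElem_range]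
    rcases eq_or_ne i k with hik | hik
    · simp [hik]
    · simp [hik, Ne.symm hik]

theorem getLast_map_range {f : Nat → Int} {n : Nat} (h : (List.range n).map f ≠ []) :
    ((List.range n).map f).getLast h = f (n - 1) := by
  rw [List.getLast_eq_getElem]
  simp

-- ---------- monotonicity of the spec DP ----------

theorem dps_le_succ (nums : List Int) (m : Nat) : dps nums m ≤ dps nums (m + 1) := by
  rw [dps_eq nums (m + 1)]
  have he : fAx nums (m + 1) (m + 1) = dps nums m := by
    rw [fAx, mxS_self, mnS_self, preF, if_neg (Nat.succ_ne_zero m), Nat.add_sub_cancel]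
    ring
  have h := le_fMax (fAx nums (m + 1)) 0 (m + 1) (m + 1) le_rfl
  rwa [Nat.zero_add, he] at h

theorem dps_mono (nums : List Int) {a b : Nat} (h : a ≤ b) : dps nums a ≤ dps nums b := by
  induction b with
  | zero =>
      have : a = 0 := by omega
      simp [this]
  | succ b ih =>
      by_cases hab : a ≤ b
      · exact le_trans (ih hab) (dps_le_succ nums b)
      · have : a = b + 1 := by omega
        simp [this]

theorem dps_nonneg (nums : List Int) (m : Nat) : 0 ≤ dps nums m := by
  have h := dps_mono nums (Nat.zero_le m)
  rwa [dps_zero] at h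

theorem preF_nonneg (nums : List Int) (a : Nat) : 0 ≤ preF nums a := by
  rw [preF]
  split_ifs
  · exact le_rfl
  · exact dps_nonneg nums _

theorem preF_mono (nums : List Int) {a b : Nat} (h : a ≤ b) : preF nums a ≤ preF nums b := by
  by_cases ha : a = 0
  · rw [preF, if_pos ha]
    exact preF_nonneg nums b
  · have hb : b ≠ 0 := by omega
    rw [preF, if_neg ha, preF, if_neg hb]
    exact dps_mono nums (by omega)

-- ---------- B side: the separated recurrence ----------

def gP (nums : List Int) (a : Nat) : Int := preF nums a + aG nums a
def gQ (nums : List Int) (a : Nat) : Int := preF nums a - aG nums a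
def PPf (nums : List Int) (j : Nat) : Int := fMax (gP nums) 0 j
def QQf (nums : List Int) (j : Nat) : Int := fMax (gQ nums) 0 j
def B1f (nums : List Int) (j : Nat) : Int := fMax (fun b => PPf nums b - aG nums b) 0 j
def B2f (nums : List Int) (j : Nat) : Int := fMax (fun b => QQf nums b + aG nums b) 0 j

-- key identity: the partition DP separates into the two prefix maxima
theorem dps_eq_maxB (nums : List Int) (j : Nat) :
    dps nums j = max (B1f nums j) (B2f nums j) := by
  apply le_antisymm
  · rw [dps_eq]
    apply fMax_le
    intro k hk
    rw [Nat.zero_add]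
    obtain ⟨ka, hka, hma⟩ := fMax_exists (aG nums) k (j - k)
    obtain ⟨kb, hkb, hmb⟩ := fMin_exists (aG nums) k (j - k)
    have hfa : fAx nums j k = preF nums k + aG nums (k + ka) - aG nums (k + kb) := by
      rw [fAx, mxS, mnS, hma, hmb]
    rcases le_total (k + ka) (k + kb) with hab | hba
    · -- argmax left of argmin: bounded by B1f
      have h1 : preF nums k + aG nums (k + ka) ≤ PPf nums (k + kb) := by
        have h2 := le_fMax (gP nums) 0 (k + kb) (k + ka) hab
        rw [Nat.zero_add, gP] at h2
        have h2' : preF nums (k + ka) + aG nums (k + ka) ≤ PPf nums (k + kb) := h2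
        have h3 := preF_mono nums (show k ≤ k + ka by omega)
        omega
      have h4 : PPf nums (k + kb) - aG nums (k + kb) ≤ B1f nums j := by
        have h5 := le_fMax (fun b => PPf nums b - aG nums b) 0 j (k + kb) (by omega)
        rwa [Nat.zero_add] at h5
      rw [hfa]
      have : preF nums k + aG nums (k + ka) - aG nums (k + kb) ≤ B1f nums j := by omega
      exact le_trans this (le_max_left _ _)
    · -- argmin left of argmax: bounded by B2f
      have h1 : preF nums k - aG nums (k + kb) ≤ QQf nums (k + ka) := by
        have h2 := le_fMax (gQ nums) 0 (k + ka) (k + kb) hba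
        rw [Nat.zero_add, gQ] at h2
        have h2' : preF nums (k + kb) - aG nums (k + kb) ≤ QQf nums (k + ka) := h2
        have h3 := preF_mono nums (show k ≤ k + kb by omega)
        omega
      have h4 : QQf nums (k + ka) + aG nums (k + ka) ≤ B2f nums j := by
        have h5 := le_fMax (fun b => QQf nums b + aG nums b) 0 j (k + ka) (by omega)
        rwa [Nat.zero_add] at h5
      rw [hfa]
      have : preF nums k + aG nums (k + ka) - aG nums (k + kb) ≤ B2f nums j := by omega
      exact le_trans this (le_max_right _ _)
  · apply max_le
    · rw [B1f]
      apply fMax_le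
      intro b hb
      rw [Nat.zero_add]
      obtain ⟨a, ha, hpa⟩ := fMax_exists (gP nums) 0 b
      rw [Nat.zero_add] at hpa
      have h1 : aG nums a ≤ mxS nums a j := by
        have h := le_fMax (aG nums) a (j - a) 0 (Nat.zero_le _)
        simpa using h
      have h2 : mnS nums a j ≤ aG nums b := by
        have h := fMin_le_elem (aG nums) a (j - a) (b - a) (by omega)
        rwa [show a + (b - a) = b by omega] at h
      have h3 : fAx nums j a ≤ dps nums j := by
        rw [dps_eq]
        have h := le_fMax (fAx nums j) 0 j a (by omega)
        rwa [Nat.zero_add] at h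
      have hpa' : PPf nums b = preF nums a + aG nums a := hpa
      have hfx : fAx nums j a = preF nums a + mxS nums a j - mnS nums a j := rfl
      have h5 : PPf nums b - aG nums b ≤ fAx nums j a := by omega
      exact le_trans h5 h3
    · rw [B2f]
      apply fMax_le
      intro a hajj
      rw [Nat.zero_add]
      obtain ⟨b, hb, hqb⟩ := fMax_exists (gQ nums) 0 a
      rw [Nat.zero_add] at hqb
      have h1 : aG nums a ≤ mxS nums b j := by
        have h := le_fMax (aG nums) b (j - b) (a - b) (by omega)
        rwa [show b + (a - b) = a by omega] at h
      have h2 : mnS nums b j ≤ aG nums b := by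
        have h := fMin_le_elem (aG nums) b (j - b) 0 (Nat.zero_le _)
        simpa using h
      have h3 : fAx nums j b ≤ dps nums j := by
        rw [dps_eq]
        have h := le_fMax (fAx nums j) 0 j b (by omega)
        rwa [Nat.zero_add] at h
      have hqb' : QQf nums a = preF nums b - aG nums b := hqb
      have hfx : fAx nums j b = preF nums b + mxS nums b j - mnS nums b j := rfl
      have h5 : QQf nums a + aG nums a ≤ fAx nums j b := by omega
      exact le_trans h5 h3

-- the fold of B maintains (PPf, QQf, B1f, B2f, dps) at the processed prefix
theorem B_loop (nums : List Int) (c : Nat) :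
    (List.range' 1 c).foldl
      (fun (st : Int × Int × Int × Int × Int) j =>
        let x := nums.getD j 0
        let mP := max st.1 (st.2.2.2.2 + x)
        let mQ := max st.2.1 (st.2.2.2.2 - x)
        let b1 := max st.2.2.1 (mP - x)
        let b2 := max st.2.2.2.1 (mQ + x)
        (mP, mQ, b1, b2, max b1 b2))
      (nums.getD 0 0, -(nums.getD 0 0), 0, 0, 0)
    = (PPf nums c, QQf nums c, B1f nums c, B2f nums c, dps nums c) := by
  induction c with
  | zero =>
      simp only [List.range'_zero, List.foldl_nil]
      have hP : PPf nums 0 = nums.getD 0 0 := by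
        show gP nums 0 = _
        rw [gP, preF, aG]
        simp
      have hQ : QQf nums 0 = -(nums.getD 0 0) := by
        show gQ nums 0 = _
        rw [gQ, preF, aG]
        simp
      have hB1 : B1f nums 0 = 0 := by
        show PPf nums 0 - aG nums 0 = 0
        rw [hP, aG]
        ring
      have hB2 : B2f nums 0 = 0 := by
        show QQf nums 0 + aG nums 0 = 0
        rw [hQ, aG]
        ring
      rw [hP, hQ, hB1, hB2, dps_zero]
  | succ c ih =>
      have hcat : List.range' 1 (c + 1) = List.range' 1 c ++ [1 + c] := by
        simpa using (List.range'_concat (s := 1) (n := c) (step := 1))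
      rw [hcat, List.foldl_append, ih, List.foldl_cons, List.foldl_nil]
      have hx : nums.getD (1 + c) 0 = aG nums (c + 1) := by
        rw [aG, Nat.add_comm]
      have hgP : gP nums (c + 1) = dps nums c + aG nums (c + 1) := by
        rw [gP, preF, if_neg (Nat.succ_ne_zero c), Nat.add_sub_cancel]
      have hgQ : gQ nums (c + 1) = dps nums c - aG nums (c + 1) := by
        rw [gQ, preF, if_neg (Nat.succ_ne_zero c), Nat.add_sub_cancel]
      have hP : max (PPf nums c) (dps nums c + aG nums (c + 1)) = PPf nums (c + 1) := by
        rw [show PPf nums (c + 1)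
            = max (fMax (gP nums) 0 c) (gP nums (0 + (c + 1))) from rfl,
          Nat.zero_add, hgP]
        rfl
      have hQ : max (QQf nums c) (dps nums c - aG nums (c + 1)) = QQf nums (c + 1) := by
        rw [show QQf nums (c + 1)
            = max (fMax (gQ nums) 0 c) (gQ nums (0 + (c + 1))) from rfl,
          Nat.zero_add, hgQ]
        rfl
      have hB1 : max (B1f nums c) (PPf nums (c + 1) - aG nums (c + 1)) = B1f nums (c + 1) := by
        rw [show B1f nums (c + 1)
            = max (fMax (fun b => PPf nums b - aG nums b) 0 c)
                (PPf nums (0 + (c + 1)) - aG nums (0 + (c + 1))) from rfl,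
          Nat.zero_add]
        rfl
      have hB2 : max (B2f nums c) (QQf nums (c + 1) + aG nums (c + 1)) = B2f nums (c + 1) := by
        rw [show B2f nums (c + 1)
            = max (fMax (fun b => QQf nums b + aG nums b) 0 c)
                (QQf nums (0 + (c + 1)) + aG nums (0 + (c + 1))) from rfl,
          Nat.zero_add]
        rfl
      show (max (PPf nums c) (dps nums c + nums.getD (1 + c) 0),
            max (QQf nums c) (dps nums c - nums.getD (1 + c) 0),
            max (B1f nums c) (max (PPf nums c) (dps nums c + nums.getD (1 + c) 0) - nums.getD (1 + c) 0),
            max (B2f nums c) (max (QQf nums c) (dps nums c - nums.getD (1 + c) 0) + nums.getD (1 + c) 0),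
            max (max (B1f nums c) (max (PPf nums c) (dps nums c + nums.getD (1 + c) 0) - nums.getD (1 + c) 0))
                (max (B2f nums c) (max (QQf nums c) (dps nums c - nums.getD (1 + c) 0) + nums.getD (1 + c) 0)))
          = (PPf nums (c + 1), QQf nums (c + 1), B1f nums (c + 1), B2f nums (c + 1), dps nums (c + 1))
      rw [hx, hP, hQ, hB1, hB2, (dps_eq_maxB nums (c + 1)).symm]

theorem B_final (nums : List Int) :
    sumOfDofs_alt nums = dps nums (nums.length - 1) := by
  have e : sumOfDofs_alt nums
      = ((List.range' 1 (nums.length - 1)).foldl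
          (fun (st : Int × Int × Int × Int × Int) j =>
            let x := nums.getD j 0
            let mP := max st.1 (st.2.2.2.2 + x)
            let mQ := max st.2.1 (st.2.2.2.2 - x)
            let b1 := max st.2.2.1 (mP - x)
            let b2 := max st.2.2.2.1 (mQ + x)
            (mP, mQ, b1, b2, max b1 b2))
          (nums.getD 0 0, -(nums.getD 0 0), 0, 0, 0)).2.2.2.2 := rfl
  rw [e, B_loop]

-- ---------- A side ----------

def AVf (nums : List Int) (t j : Nat) : Int :=
  if j < t then dps nums j else if t = 0 then 0 else fMax (fAx nums j) 0 (t - 1)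

def Cf (nums : List Int) (t s j : Nat) : Int :=
  if j ≤ t then dps nums j else if j ≤ s then fMax (fAx nums j) 0 t else AVf nums t j

theorem phase1 (nums : List Int) (t : Nat) (ht : t < nums.length) :
    ((List.range nums.length).map (AVf nums t)).set t
      (max (PySem.List.pyGetD ((List.range nums.length).map (AVf nums t)) ((t : Int) - 1) 0)
           (((List.range nums.length).map (AVf nums t)).getD t 0))
    = (List.range nums.length).map (Cf nums t t) := by
  have hget : ((List.range nums.length).map (AVf nums t)).getD t 0 = AVf nums t t :=
    getD_map_range ht 0
  have hread : PySem.List.pyGetD ((List.range nums.length).map (AVf nums t)) ((t : Int) - 1) 0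
      = preF nums t := by
    by_cases ht0 : t = 0
    · subst ht0
      have hne : (List.range nums.length).map (AVf nums 0) ≠ [] := by
        apply List.ne_nil_of_length_pos
        simpa using ht
      have hc : ((0 : Nat) : Int) - 1 = -1 := by norm_num
      rw [hc, PySem.List.pyGetD_neg_one (h := hne), getLast_map_range hne]
      simp [AVf, preF]
    · have hc : (t : Int) - 1 = ((t - 1 : Nat) : Int) := by omega
      rw [hc, PySem.List.pyGetD_natCast, getD_map_range (by omega)]
      rw [AVf, if_pos (by omega), preF, if_neg ht0]
  have hv : max (preF nums t) (AVf nums t t) = dps nums t := by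
    by_cases ht0 : t = 0
    · subst ht0
      rw [dps_zero]
      simp [AVf, preF]
    · rw [AVf, if_neg (by omega), if_neg ht0, dps_eq nums t,
          fMax_succ_top (fAx nums t) 0 t (by omega), max_comm (preF nums t)]
      congr 1
      rw [Nat.zero_add, fAx, mxS_self, mnS_self]
      ring
  rw [hget, hread, hv, set_map_range ht]
  apply List.map_congr_left
  intro j hj
  rw [List.mem_range] at hj
  by_cases hjt : j = t
  · subst hjt
    simp [Cf]
  · rw [if_neg hjt, Cf]
    by_cases h1 : j ≤ t
    · rw [if_pos h1, AVf, if_pos (by omega)]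
    · rw [if_neg h1, if_neg h1]

theorem A_inner (nums : List Int) (t : Nat) :
    ∀ c s, t ≤ s → s + 1 + c = nums.length →
    (List.range' (s + 1) c).foldl
      (fun (st : List Int × Int × Int) j =>
        let minn := min st.2.2 (nums.getD j 0)
        let maxn := max st.2.1 (nums.getD j 0)
        let dof := st.1.set j (max (st.1.getD j 0)
          (PySem.List.pyGetD st.1 ((t : Int) - 1) 0 + maxn - minn))
        (dof, maxn, minn))
      ((List.range nums.length).map (Cf nums t s), mxS nums t s, mnS nums t s)
    = ((List.range nums.length).map (Cf nums t (nums.length - 1)),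
        mxS nums t (nums.length - 1), mnS nums t (nums.length - 1)) := by
  intro c
  induction c with
  | zero =>
      intro s hts hsc
      have hs : s = nums.length - 1 := by omega
      subst hs
      simp
  | succ c ih =>
      intro s hts hsc
      have hn1 : s + 1 < nums.length := by omega
      rw [List.range'_succ, List.foldl_cons]
      have hmn : min (mnS nums t s) (nums.getD (s + 1) 0) = mnS nums t (s + 1) :=
        mnS_extend nums hts
      have hmx : max (mxS nums t s) (nums.getD (s + 1) 0) = mxS nums t (s + 1) :=
        mxS_extend nums hts
      have hget : ((List.range nums.length).map (Cf nums t s)).getD (s + 1) 0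
          = AVf nums t (s + 1) := by
        rw [getD_map_range hn1, Cf, if_neg (by omega), if_neg (by omega)]
      have hread : PySem.List.pyGetD ((List.range nums.length).map (Cf nums t s)) ((t : Int) - 1) 0
          = preF nums t := by
        by_cases ht0 : t = 0
        · subst ht0
          have hne : (List.range nums.length).map (Cf nums 0 s) ≠ [] := by
            apply List.ne_nil_of_length_pos
            simpa using (show 0 < nums.length from by omega)
          have hc : ((0 : Nat) : Int) - 1 = -1 := by norm_num
          rw [hc, PySem.List.pyGetD_neg_one (h := hne), getLast_map_range hne]
          rw [Cf, if_neg (by omega), if_neg (by omega)]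
          simp [AVf, preF]
        · have hc : (t : Int) - 1 = ((t - 1 : Nat) : Int) := by omega
          rw [hc, PySem.List.pyGetD_natCast, getD_map_range (by omega)]
          rw [Cf, if_pos (by omega), preF, if_neg ht0]
      have hval : max (AVf nums t (s + 1)) (preF nums t + mxS nums t (s + 1) - mnS nums t (s + 1))
          = fMax (fAx nums (s + 1)) 0 t := by
        by_cases ht0 : t = 0
        · subst ht0
          rw [AVf, if_neg (by omega), if_pos rfl]
          rw [show preF nums 0 + mxS nums 0 (s + 1) - mnS nums 0 (s + 1)
              = fAx nums (s + 1) 0 from rfl]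
          rw [show fMax (fAx nums (s + 1)) 0 0 = fAx nums (s + 1) 0 from rfl]
          apply max_eq_right
          have hle : mnS nums 0 (s + 1) ≤ mxS nums 0 (s + 1) := by
            rw [mnS, mxS]; exact fMin_le_fMax _ _ _
          have hp : preF nums 0 = 0 := by simp [preF]
          rw [fAx, hp]
          omega
        · rw [AVf, if_neg (by omega), if_neg ht0,
              fMax_succ_top (fAx nums (s + 1)) 0 t (by omega)]
          congr 1
          rw [Nat.zero_add]
          rfl
      have hmapeq : ((List.range nums.length).map (Cf nums t s)).set (s + 1)
            (fMax (fAx nums (s + 1)) 0 t)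
          = (List.range nums.length).map (Cf nums t (s + 1)) := by
        rw [set_map_range hn1]
        apply List.map_congr_left
        intro j hj
        rw [List.mem_range] at hj
        by_cases hjs : j = s + 1
        · subst hjs
          rw [if_pos rfl, Cf, if_neg (by omega), if_pos le_rfl]
        · rw [if_neg hjs, Cf, Cf]
          by_cases hjt : j ≤ t
          · rw [if_pos hjt, if_pos hjt]
          · rw [if_neg hjt, if_neg hjt]
            by_cases hjs2 : j ≤ s
            · rw [if_pos hjs2, if_pos (by omega)]
            · rw [if_neg hjs2, if_neg (by omega)]
      simp only [hmn, hmx, hget, hread, hval, hmapeq]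
      exact ih (s + 1) (by omega) (by omega)

theorem A_outer (nums : List Int) (t : Nat) (ht : t ≤ nums.length) :
    (List.range t).foldl (fun dof i =>
      let dof := dof.set i (max (PySem.List.pyGetD dof ((i : Int) - 1) 0) (dof.getD i 0))
      let st := (List.range' (i + 1) (nums.length - (i + 1))).foldl
        (fun (st : List Int × Int × Int) j =>
          let minn := min st.2.2 (nums.getD j 0)
          let maxn := max st.2.1 (nums.getD j 0)
          let dof := st.1.set j (max (st.1.getD j 0)
            (PySem.List.pyGetD st.1 ((i : Int) - 1) 0 + maxn - minn))
          (dof, maxn, minn))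
        (dof, nums.getD i 0, nums.getD i 0)
      st.1) (List.replicate nums.length 0)
    = (List.range nums.length).map (AVf nums t) := by
  induction t with
  | zero =>
      apply List.ext_getElem
      · simp
      · intro i h1 h2
        simp [AVf]
  | succ t ih =>
      have htn : t < nums.length := by omega
      rw [List.range_succ, List.foldl_append, ih (by omega)]
      simp only [List.foldl_cons, List.foldl_nil]
      rw [phase1 nums t htn]
      have hinit : (((List.range nums.length).map (Cf nums t t) : List Int),
            (nums.getD t 0 : Int), (nums.getD t 0 : Int))
          = ((List.range nums.length).map (Cf nums t t), mxS nums t t, mnS nums t t) := by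
        rw [mxS_self, mnS_self]
      rw [hinit, A_inner nums t (nums.length - (t + 1)) t le_rfl (by omega)]
      show (List.range nums.length).map (Cf nums t (nums.length - 1))
          = (List.range nums.length).map (AVf nums (t + 1))
      apply List.map_congr_left
      intro j hj
      rw [List.mem_range] at hj
      by_cases hjt : j ≤ t
      · rw [Cf, if_pos hjt, AVf, if_pos (by omega)]
      · rw [Cf, if_neg hjt, if_pos (by omega), AVf, if_neg (by omega), if_neg (by omega)]
        rfl

theorem A_final (nums : List Int) (h : nums ≠ []) :
    sumOfDofs nums = dps nums (nums.length - 1) := by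
  have hn : 0 < nums.length := List.length_pos_iff.mpr h
  have e : sumOfDofs nums = PySem.List.pyGetD
      ((List.range nums.length).foldl (fun dof i =>
        let dof := dof.set i (max (PySem.List.pyGetD dof ((i : Int) - 1) 0) (dof.getD i 0))
        let st := (List.range' (i + 1) (nums.length - (i + 1))).foldl
          (fun (st : List Int × Int × Int) j =>
            let minn := min st.2.2 (nums.getD j 0)
            let maxn := max st.2.1 (nums.getD j 0)
            let dof := st.1.set j (max (st.1.getD j 0)
              (PySem.List.pyGetD st.1 ((i : Int) - 1) 0 + maxn - minn))
            (dof, maxn, minn))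
          (dof, nums.getD i 0, nums.getD i 0)
        st.1) (List.replicate nums.length 0)) (-1) 0 := rfl
  rw [e, A_outer nums nums.length le_rfl]
  have hne : (List.range nums.length).map (AVf nums nums.length) ≠ [] := by
    apply List.ne_nil_of_length_pos
    simpa using hn
  rw [PySem.List.pyGetD_neg_one (h := hne), getLast_map_range hne]
  rw [AVf, if_pos (by omega)]

-- ===== VERDICT (by name: the statement is the Claim_ definition above) =====
theorem sumOfDofs_spec : Claim_equal_sumOfDofs := by
  intro nums _ hpre
  show sumOfDofs nums = sumOfDofs_alt nums
  rw [A_final nums hpre, B_final nums]
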